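/- GENERATED by mk_final_copies.py from the proof of the farm's unit `inverse_mdct.1` (farm:inverse_mdct.1.2: Lemmas.lean) as the
   re-elaboration sweep compiled it — do not edit. -/
/-
  LEMMAS OF THE UNIT `inverse_mdct.1` (segment 1 of `inverse_mdct`: the prologue, `n2 n4 n8`, `save_point`, the temp
  allocation, `A`, the L1 set-up; 0x109220 … 0x1092e6 → `loop1` 0x1093a2).

      shl2_toNat      `shl r64, 2` of a small number, as a number
      exit_loop1      THE EXIT ASSERTION `inverse_mdct.At2` at the head of loop L1, built from the facts the two walks of
                      Proof.lean leave (the memory at the callee's entry, the callee's footprint and post, the stack slots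
                      carried over it, the registers and the memory at `loop1`). No walk inside: pure frame reasoning.
-/
import Asan.CheckWalk
import Vorbis.Spec.MdctUse
open X86 X86.User Asan Vorbis Vorbis.Spec

namespace Vorbis.Spec.inverse_mdct_1

set_option maxRecDepth 4000
set_option maxHeartbeats 4000000

/-- `shl r64, 2` of a small number is the multiplication by 4. -/
theorem shl2_toNat (X : Word) (m : Nat) (h : X.toNat = m) (hm : m < 2 ^ 60) : (X <<< 2).toNat = 4 * m := by
  rw [UInt64.toNat_shiftLeft, h]
  have e2 : (2 : Word).toNat % 64 = 2 := rfl
  rw [e2, Nat.shiftLeft_eq]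
  omega

/-- **The exit assertion `At2` at the head of loop L1** (`loop1`, 0x1093a2, line 2692), BUILT from the facts the two walks of
Proof.lean leave. `s0` = the state at the entry of setup_temp_malloc (0x109290; `hS0`: only stack slots were written before it),
`sr` = the state after its return (`cut1`, 0x109295; `w_same` its footprint with the request `2 n`, `hrax` / `harena'` /
`hshadow'` the success branch of its post, `hs0 … hssv` the stack slots carried over the footprint), `w` = the state at `loop1`
(`w_r15 … w_mem` in the walker's own form, `z` = the returned pointer). Inside: the sizes as numbers (`arg32_sar`, `toNat_sext32`,
`shl2_toNat`), the load of `f->A[bt]` read back in the entry memory (`hA`), `ADOBusy` and the shadow layer from the callee's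
post over stack-only stores, the footprint by `u_same`, every FRAME0 slot by `u_resolve`. -/
theorem exit_loop1 {Lay : Layout} {u₀ : State} {others : List Obj} {frames : List (Nat × FrameLayout)} {len : Nat} {A : Arena}
    {stored room : Int} {ysz : Nat → Nat} {k c : Nat} {ue : State} {ret : Word} {s0 sr w : State} {z : Word}
    (_hLay : Lay.hi = 0x1000000)
    (he0 : AtEntry (conv u₀) L.inverse_mdct.entry (inverse_mdct.spec others frames len A stored room ysz k c).frame ret ue)
    (hpre0 : inverse_mdct.Pre others frames len A stored room ysz k c ue)
    (hS0 : Mem.SameExcept [⟨(ue.reg .rsp).toNat - 368, (ue.reg .rsp).toNat⟩] ue.mem s0.mem)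
    (w_same : Mem.SameExcept
      [{ lo := UInt64.toNat (ue.reg Reg.rsp - 192) - 80, hi := UInt64.toNat (ue.reg Reg.rsp - 192) },
        { lo := UInt64.toNat (ue.reg Reg.rdx) + 132, hi := UInt64.toNat (ue.reg Reg.rdx) + 136 },
        shadowSpan (A.B + (A.T - (r8 (2 * arg32 ue Reg.rsi) + 32)))
          (A.B + (A.T - (r8 (2 * arg32 ue Reg.rsi) + 32)) + 2 * arg32 ue Reg.rsi)]
      s0.mem sr.mem)
    (hrax : z.toNat = A.B + (A.T - (r8 (2 * arg32 ue Reg.rsi) + 32)))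
    (harena' : ArenaOK (A.pushTemp (2 * arg32 ue Reg.rsi)) (A.newTempObj (2 * arg32 ue Reg.rsi) :: others) sr.mem
      (UInt64.toNat (ue.reg Reg.rdx)))
    (hshadow' : ShadowInv (A.newTempObj (2 * arg32 ue Reg.rsi) :: others) frames (UInt64.toNat (ue.reg Reg.rsp - 192) + 8)
      sr.mem)
    (hs0 : UInt64.ofNat (sr.mem.readLE (ue.reg Reg.rsp) 8) = ret)
    (hs1 : UInt64.ofNat (sr.mem.readLE (ue.reg Reg.rsp - 8) 8) = ue.reg Reg.rbp)
    (hs2 : UInt64.ofNat (sr.mem.readLE (ue.reg Reg.rsp - 16) 8) = ue.reg Reg.r15)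
    (hs3 : UInt64.ofNat (sr.mem.readLE (ue.reg Reg.rsp - 24) 8) = ue.reg Reg.r14)
    (hs4 : UInt64.ofNat (sr.mem.readLE (ue.reg Reg.rsp - 32) 8) = ue.reg Reg.r13)
    (hs5 : UInt64.ofNat (sr.mem.readLE (ue.reg Reg.rsp - 40) 8) = ue.reg Reg.r12)
    (hs6 : UInt64.ofNat (sr.mem.readLE (ue.reg Reg.rsp - 48) 8) = ue.reg Reg.rbx)
    (hsu : UInt64.ofNat (sr.mem.readLE (ue.reg Reg.rsp - 64) 8) = ue.reg Reg.rdi)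
    (hsn : sr.mem.readLE (ue.reg Reg.rsp - 76) 4 = (Word.part Width.w32 (ue.reg Reg.rsi)).toNat)
    (hsf : UInt64.ofNat (sr.mem.readLE (ue.reg Reg.rsp - 128) 8) = ue.reg Reg.rdx)
    (hsbt : sr.mem.readLE (ue.reg Reg.rsp - 132) 4 = (Word.part Width.w32 (ue.reg Reg.rcx)).toNat)
    (hsn2 : sr.mem.readLE (ue.reg Reg.rsp - 120) 4 = ((Word.part Width.w32 (ue.reg Reg.rsi)).sshiftRight 1).toNat)
    (hsn4 : sr.mem.readLE (ue.reg Reg.rsp - 136) 4 = ((Word.part Width.w32 (ue.reg Reg.rsi)).sshiftRight 2).toNat)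
    (hsn8 : sr.mem.readLE (ue.reg Reg.rsp - 148) 4 = ((Word.part Width.w32 (ue.reg Reg.rsi)).sshiftRight 3).toNat)
    (hssv : sr.mem.readLE (ue.reg Reg.rsp - 152) 4 = (BitVec.ofNat 32 A.T).toNat)
    (w_rip : w.rip = L.inverse_mdct.loop1)
    (w_r15 : w.reg Reg.r15 =
      ue.reg Reg.rdi + Word.ofBV (BitVec.signExtend 64 ((Word.part Width.w32 (ue.reg Reg.rsi)).sshiftRight 1)) <<< 2)
    (w_r13 : w.reg Reg.r13 = ue.reg Reg.rdi)
    (w_r12 : w.reg Reg.r12 =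
      z + Word.ofBV (BitVec.signExtend 64 ((Word.part Width.w32 (ue.reg Reg.rsi)).sshiftRight 1)) <<< 2 - 8)
    (w_rbx : w.reg Reg.rbx =
      UInt64.ofNat
        (sr.mem.readLE
          (ue.reg Reg.rdx + (Word.ofBV (BitVec.signExtend 64 (Word.part Width.w32 (ue.reg Reg.rcx))) + 174) * 8 + 8) 8))
    (w_rbp : w.reg Reg.rbp = ue.reg Reg.rsp - 8)
    (w_rsp : w.reg Reg.rsp = ue.reg Reg.rsp - 184)
    (w_mem : w.mem =
      ((((sr.mem.writeLE (ue.reg Reg.rsp - 112) 8 (UInt64.toNat z)).writeLE (ue.reg Reg.rsp - 192) 8 1086133).writeLE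
                (ue.reg Reg.rsp - 72) 8
                (UInt64.ofNat
                    (sr.mem.readLE
                      (ue.reg Reg.rdx +
                          (Word.ofBV (BitVec.signExtend 64 (Word.part Width.w32 (ue.reg Reg.rcx))) + 174) * 8 +
                        8)
                      8)).toNat).writeLE
            (ue.reg Reg.rsp - 144) 8
            (UInt64.toNat
              (Word.ofBV (BitVec.signExtend 64 ((Word.part Width.w32 (ue.reg Reg.rsi)).sshiftRight 1)) <<< 2))).writeLE
        (ue.reg Reg.rsp - 176) 8
        (UInt64.toNat
          (ue.reg Reg.rdi +
            Word.ofBV (BitVec.signExtend 64 ((Word.part Width.w32 (ue.reg Reg.rsi)).sshiftRight 1)) <<< 2)))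
    (w_eq : Mem.EqOn L.textLo L.textHi u₀.mem w.mem)
    (habi : abiInv w) :
    inverse_mdct.At2 u₀ others frames len A stored room ysz k c ue ret w := by
  have he := he0
  v_entry he
  have hsh := hpre0.shadow
  have hobj : ObjLive others frames (ue.reg .rdx).toNat := by
    have := hpre0.live _ hpre0.ob1
    rw [inverse_mdct.f_def] at this
    exact this
  have hado : ADO A others ue.mem (ue.reg .rdx).toNat := by
    have := hpre0.ado
    rw [inverse_mdct.f_def] at this
    exact this
  have hwhere := hobj.where_ hsh.inv hsh.offText (by omega)
  have hB1 := hado.ok.AR1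
  have hbounds := hado.ok.bounds
  -- the arguments as numbers
  have hfacts := hpre0.isBlocksize.facts
  have hnn : inverse_mdct.n ue = arg32 ue .rsi := by
    rw [inverse_mdct.n_def, arg32_def]
  rw [hnn] at hfacts
  have hn31 : arg32 ue .rsi < 2 ^ 31 := by omega
  have hbtn : inverse_mdct.bt ue = arg32 ue .rcx := by
    rw [inverse_mdct.bt_def, arg32_def]
  have hbt : arg32 ue .rcx < 2 := by
    rw [← hbtn]
    exact hpre0.btLt
  have hb := arg32_sext ue .rcx (by omega)
  have hpn : (Word.part .w32 (ue.reg .rsi)).toNat = arg32 ue .rsi := by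
    rw [part32_toNat, arg32_def]
  have hpbt : (Word.part .w32 (ue.reg .rcx)).toNat = arg32 ue .rcx := by
    rw [part32_toNat, arg32_def]
  have hn2 : ((Word.part .w32 (ue.reg .rsi)).sshiftRight 1).toNat = arg32 ue .rsi / 2 := by
    have := arg32_sar ue .rsi 1 hn31
    rw [toNat_ofBV32] at this
    exact this
  have hn4 : ((Word.part .w32 (ue.reg .rsi)).sshiftRight 2).toNat = arg32 ue .rsi / 4 := by
    have := arg32_sar ue .rsi 2 hn31
    rw [toNat_ofBV32] at this
    exact this
  have hn8 : ((Word.part .w32 (ue.reg .rsi)).sshiftRight 3).toNat = arg32 ue .rsi / 8 := by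
    have := arg32_sar ue .rsi 3 hn31
    rw [toNat_ofBV32] at this
    exact this
  have hX : (Word.ofBV (BitVec.signExtend 64 ((Word.part .w32 (ue.reg .rsi)).sshiftRight 1))).toNat = arg32 ue .rsi / 2 := by
    rw [toNat_sext32 _ (by omega), hn2]
  have hX4 := shl2_toNat _ _ hX (by omega)
  -- the temp block, the buffer, the table `A` as numbers
  have htmp : inverse_mdct.tmp A ue = A.B + (A.T - (r8 (2 * arg32 ue .rsi) + 32)) := by
    rw [inverse_mdct.tmp_def, arg32_def]
  have htr := hpre0.tmp_range
  rw [hnn, htmp] at htr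
  have hbufin := hpre0.ok.inside _ hpre0.buf_blk
  have hAin := hpre0.ok.inside _ hpre0.tabA_blk
  have hnle := hpre0.n_le
  simp only [vblock] at hbufin hAin
  rw [inverse_mdct.buf_def] at hbufin
  rw [hnn, inverse_mdct.f_def] at hnle
  -- the callee's shadow window and ours as numbers (`u_omega` does not unfold `shadowSpan`)
  have hswlo : (shadowSpan (A.B + (A.T - (r8 (2 * arg32 ue Reg.rsi) + 32)))
        (A.B + (A.T - (r8 (2 * arg32 ue Reg.rsi) + 32)) + 2 * arg32 ue Reg.rsi)).lo =
        0xC00000 + (A.B + (A.T - (r8 (2 * arg32 ue Reg.rsi) + 32))) / 8 := rfl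
  have hswhi : (shadowSpan (A.B + (A.T - (r8 (2 * arg32 ue Reg.rsi) + 32)))
        (A.B + (A.T - (r8 (2 * arg32 ue Reg.rsi) + 32)) + 2 * arg32 ue Reg.rsi)).hi =
        0xC00000 + (A.B + (A.T - (r8 (2 * arg32 ue Reg.rsi) + 32)) + 2 * arg32 ue Reg.rsi + 7) / 8 := rfl
  have hswlo' : (shadowSpan (A.B + (A.T - (r8 (2 * arg32 ue Reg.rsi) + 32))) (A.B + A.T)).lo =
        0xC00000 + (A.B + (A.T - (r8 (2 * arg32 ue Reg.rsi) + 32))) / 8 := rfl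
  have hswhi' : (shadowSpan (A.B + (A.T - (r8 (2 * arg32 ue Reg.rsi) + 32))) (A.B + A.T)).hi =
        0xC00000 + (A.B + A.T + 7) / 8 := rfl
  -- `bt` sign-extended (`movsxd rax, [rbp-0x7c]`) is a word `b` with the value `bt`
  generalize Word.ofBV (BitVec.signExtend 64 (Word.part Width.w32 (ue.reg Reg.rcx))) = b at hb w_rbx w_mem
  -- the pointer `f->A[bt]`: the load at 0x1092b5 reads the entry memory's value
  have haddr : (ue.reg .rdx + (b + 174) * 8 + 8).toNat = (ue.reg .rdx).toNat + 1400 + 8 * arg32 ue .rcx := by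
    u_omega
  have hA0 : ue.mem.readLE (ue.reg .rdx + (b + 174) * 8 + 8) 8 = inverse_mdct.tabA ue := by
    rw [eq_addr _ _ haddr, inverse_mdct.tabA_def, inverse_mdct.f_def, hbtn]
    simp only [vacc, voff]
    rw [Mem.u64]
  have hA : sr.mem.readLE (ue.reg .rdx + (b + 174) * 8 + 8) 8 = inverse_mdct.tabA ue := by
    u_frame hA0
  rw [hA] at w_rbx w_mem
  have hAlt : (UInt64.ofNat (inverse_mdct.tabA ue)).toNat = inverse_mdct.tabA ue := by
    rw [UInt64.toNat_ofNat']
    apply Nat.mod_eq_of_lt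
    omega
  rw [hAlt] at w_mem
  -- what the segment wrote after the call: stack slots only
  have hSr : Mem.SameExcept [⟨(ue.reg .rsp).toNat - 368, (ue.reg .rsp).toNat⟩] sr.mem w.mem := by
    u_same
  have hun : ShadowUntouched sr.mem w.mem := by
    v_untouched
  have hobjS : (Vorbis.Block.mk (ue.reg .rdx).toNat Off.sizeof.stb_vorbis).Same sr.mem w.mem := by
    simp only [vblock, voff]
    apply hSr.eqOn
    intro x hx
    simp only [List.mem_cons, List.mem_nil_iff, or_false] at hx
    subst hx
    simp only []
    omega
  -- `temp_memory_required` is not written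
  have htmr : stb_vorbis.temp_memory_required w.mem (ue.reg .rdx).toNat =
      stb_vorbis.temp_memory_required ue.mem (ue.reg .rdx).toNat := by
    have e1 : stb_vorbis.temp_memory_required w.mem (ue.reg .rdx).toNat = w.mem.readLE (addr ((ue.reg .rdx).toNat + 12)) 4 := by
      simp only [vacc, voff]
      rw [Mem.u32]
    have e2 : stb_vorbis.temp_memory_required ue.mem (ue.reg .rdx).toNat = ue.mem.readLE (addr ((ue.reg .rdx).toNat + 12)) 4 := by
      simp only [vacc, voff]
      rw [Mem.u32]
    rw [e1, e2, ← readLE_field, ← readLE_field]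
    have h0 : ue.mem.readLE (ue.reg .rdx + UInt64.ofNat 12) 4 = ue.mem.readLE (ue.reg .rdx + UInt64.ofNat 12) 4 := rfl
    u_frame h0
  -- the busy arena: the callee's `ArenaOK`, carried over the slots written after the call
  have hbusy : ADOBusy (A.pushTemp (2 * inverse_mdct.n ue)) (A.newTempObj (2 * inverse_mdct.n ue) :: others) w.mem
      (inverse_mdct.f ue) (2 * inverse_mdct.n ue) := by
    rw [hnn, inverse_mdct.f_def]
    have ht3 : 2 * arg32 ue .rsi ≤ stb_vorbis.temp_memory_required ue.mem (ue.reg .rdx).toNat := by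
      have := hpre0.t3
      rw [hnn, inverse_mdct.f_def] at this
      exact this
    have h8 : r8 (2 * arg32 ue .rsi) ≤ stb_vorbis.temp_memory_required ue.mem (ue.reg .rdx).toNat :=
      r8_le_of_le ht3 hado.tmr8
    refine ⟨harena'.frame_obj (by simp only [voff]; omega) hobjS, ?_, ?_, ?_, ?_⟩
    · show (A.T - (r8 (2 * arg32 ue .rsi) + 32), 2 * arg32 ue .rsi) :: A.temps =
        [(A.T - (r8 (2 * arg32 ue .rsi) + 32), 2 * arg32 ue .rsi)]
      rw [hado.idle]
    · rw [htmr]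
      exact h8
    · rw [htmr]
      exact hado.tmr8
    · rw [htmr]
      exact hado.room
  -- the shadow layer: the callee's, at the steady stack pointer
  have hshadow : ShadowInv (A.newTempObj (2 * inverse_mdct.n ue) :: others) frames ((ue.reg .rsp).toNat - 184) w.mem := by
    rw [hnn]
    have et : (ue.reg .rsp - 192).toNat + 8 = (ue.reg .rsp).toNat - 184 := by u_omega
    rw [← et]
    exact hshadow'.untouched hun
  -- the footprint so far
  have hsame : Mem.SameExcept ((inverse_mdct.spec others frames len A stored room ysz k c).footprint ue) ue.mem w.mem := by
    simp only [X86.User.Spec.footprint, inverse_mdct.spec_frame, inverse_mdct.spec_writes]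
    rw [inverse_mdct.buf_def, hnn, htmp, inverse_mdct.f_def]
    clear hwhere hbounds hB1 hbufin hAin hnle hfacts hn31 hbt hb haddr he_align he_ret_lt hX hX4 hn2 hn4 hn8 hpn hpbt hAlt hrax
    u_same
  -- the registers at the loop head as numbers
  generalize Word.ofBV (BitVec.signExtend 64 ((Word.part Width.w32 (ue.reg Reg.rsi)).sshiftRight 1)) <<< 2 = Y
    at hX4 w_r15 w_r12 w_mem
  have hr13 : (w.reg .r13).toNat = inverse_mdct.buf ue := by
    rw [w_r13, inverse_mdct.buf_def]
  have hrbx : (w.reg .rbx).toNat = inverse_mdct.tabA ue := by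
    rw [w_rbx]
    exact hAlt
  have hr12 : (w.reg .r12).toNat + 8 = inverse_mdct.tmp A ue + 4 * (inverse_mdct.n ue / 2) := by
    rw [w_r12, htmp, hnn]
    u_omega
  have hr15 : (w.reg .r15).toNat = inverse_mdct.buf ue + 4 * (inverse_mdct.n ue / 2) := by
    rw [w_r15, inverse_mdct.buf_def, hnn]
    u_omega
  -- the frame
  have sret : UInt64.ofNat (w.mem.readLE (ue.reg .rsp) 8) = ret := by u_resolve
  have srbp : UInt64.ofNat (w.mem.readLE (ue.reg .rsp - 8) 8) = ue.reg .rbp := by u_resolve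
  have sr15 : UInt64.ofNat (w.mem.readLE (ue.reg .rsp - 16) 8) = ue.reg .r15 := by u_resolve
  have sr14 : UInt64.ofNat (w.mem.readLE (ue.reg .rsp - 24) 8) = ue.reg .r14 := by u_resolve
  have sr13 : UInt64.ofNat (w.mem.readLE (ue.reg .rsp - 32) 8) = ue.reg .r13 := by u_resolve
  have sr12 : UInt64.ofNat (w.mem.readLE (ue.reg .rsp - 40) 8) = ue.reg .r12 := by u_resolve
  have srbx : UInt64.ofNat (w.mem.readLE (ue.reg .rsp - 48) 8) = ue.reg .rbx := by u_resolve
  have sf : UInt64.ofNat (w.mem.readLE (ue.reg .rsp - 128) 8) = ue.reg .rdx := by u_resolve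
  have sbt : w.mem.readLE (ue.reg .rsp - 132) 4 = inverse_mdct.bt ue := by
    rw [hbtn, ← hpbt]
    u_resolve
  have ssave : w.mem.readLE (ue.reg .rsp - 152) 4 = A.T := by
    have e : (BitVec.ofNat 32 A.T).toNat = A.T := toNat_ofNat32 _ (by omega)
    rw [← e]
    u_resolve
  have sv : w.mem.readLE (ue.reg .rsp - 112) 8 = inverse_mdct.tmp A ue := by
    rw [htmp, ← hrax]
    u_resolve
  have su : UInt64.ofNat (w.mem.readLE (ue.reg .rsp - 64) 8) = ue.reg .rdi := by u_resolve
  have sn : w.mem.readLE (ue.reg .rsp - 76) 4 = inverse_mdct.n ue := by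
    rw [hnn, ← hpn]
    u_resolve
  have sumid : w.mem.readLE (ue.reg .rsp - 176) 8 = inverse_mdct.buf ue + 4 * (inverse_mdct.n ue / 2) := by
    rw [← hr15, w_r15]
    u_resolve
  have sa : w.mem.readLE (ue.reg .rsp - 72) 8 = inverse_mdct.tabA ue := by
    u_resolve
    apply Nat.mod_eq_of_lt
    omega
  have sn2 : w.mem.readLE (ue.reg .rsp - 120) 4 = inverse_mdct.n ue / 2 := by
    rw [hnn, ← hn2]
    u_resolve
  have sn2x4 : w.mem.readLE (ue.reg .rsp - 144) 8 = 4 * (inverse_mdct.n ue / 2) := by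
    rw [hnn, ← hX4]
    u_resolve
  have sn8 : w.mem.readLE (ue.reg .rsp - 148) 4 = inverse_mdct.n ue / 8 := by
    rw [hnn, ← hn8]
    u_resolve
  have sn4 : w.mem.readLE (ue.reg .rsp - 136) 4 = inverse_mdct.n ue / 4 := by
    rw [hnn, ← hn4]
    u_resolve
  exact
    { rip := w_rip
      body :=
        { entry := he0
          pre := hpre0
          code := w_eq
          abi := habi
          rbp := w_rbp
          rsp := w_rsp
          retSlot := sret
          rbpSlot := srbp
          r15Slot := sr15
          r14Slot := sr14
          r13Slot := sr13
          r12Slot := sr12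
          rbxSlot := srbx
          same := hsame
          busy := hbusy
          shadow := hshadow
          fSlot := sf
          btSlot := sbt
          saveSlot := ssave
          vSlot := sv }
      sBuf := ⟨su, sn, sumid⟩
      sA := ⟨sa, sn2, sn2x4, sn8⟩
      n4Slot := sn4
      r13 := hr13
      rbx := hrbx
      r12 := hr12
      r15 := hr15 }

end Vorbis.Spec.inverse_mdct_1
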